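-- pv_equiv track=rewrite | github.com/99pranit/Python-Practice | Searching_Sorting/linear_search_rec.py | search
-- ===== SOURCE A (Python) =====
-- def search(arr , target , index = 0 , answer = None):
--     if answer is None:
--         answer = []
--     if index == len(arr):
--         return answer
--     elif arr[index] == target:
--         answer.append(index + 1)
--     return search(arr , target , index + 1, answer)
-- ===== SOURCE B (Python) =====
-- def search(arr, target, index=0, answer=None):
--     if answer is None:
--         answer = []
--     for i in range(index, len(arr)):
--         if arr[i] == target:
--             answer.append(i + 1)
--     return answer
-- ===== Notes on version B (the rewrite author's own statement) =====
-- stated objective: simpler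
-- what changed: Replaces the accumulator-passing tail recursion by a direct iterative for-loop over range(index, len(arr)).
import Mathlib
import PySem

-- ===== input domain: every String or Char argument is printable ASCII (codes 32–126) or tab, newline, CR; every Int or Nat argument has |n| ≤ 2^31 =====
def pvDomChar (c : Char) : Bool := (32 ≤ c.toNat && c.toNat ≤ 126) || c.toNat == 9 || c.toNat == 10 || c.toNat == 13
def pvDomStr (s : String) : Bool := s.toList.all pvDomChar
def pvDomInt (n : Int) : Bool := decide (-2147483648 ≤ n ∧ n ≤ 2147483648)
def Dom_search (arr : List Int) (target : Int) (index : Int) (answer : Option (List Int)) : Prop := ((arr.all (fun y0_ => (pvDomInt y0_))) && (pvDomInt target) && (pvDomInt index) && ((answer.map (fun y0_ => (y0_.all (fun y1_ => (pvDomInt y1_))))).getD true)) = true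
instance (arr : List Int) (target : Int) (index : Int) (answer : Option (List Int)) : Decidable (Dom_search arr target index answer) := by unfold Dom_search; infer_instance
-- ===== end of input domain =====

-- B replaces A's accumulator-passing tail recursion by a direct for-loop over range(index, len(arr));
-- both A and B append into (mutate) a caller-supplied `answer` list identically, so return-value equivalence covers the mutation too.
-- ===== PORT A =====
def search (arr : List Int) (target : Int) (index : Int) (answer : Option (List Int)) : List Int :=
  let ans := answer.getD []          -- if answer is None: answer = []
  if index = (arr.length : Int) then ans
  else
    match h : PySem.List.pyGet? arr index with
    | none => ans                    -- Python raises IndexError here (excluded by Pre_search)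
    | some v =>
      let ans' := if v = target then ans ++ [index + 1] else ans
      search arr target (index + 1) (some ans')
termination_by ((arr.length : Int) - index).toNat
decreasing_by
  have : PySem.Raise.InRange arr.length index := by
    by_contra hn
    rw [(PySem.List.pyGet?_eq_none_iff arr index).mpr hn] at h
    simp at h
  unfold PySem.Raise.InRange at this
  omega

-- ===== PORT B =====
def search_alt (arr : List Int) (target : Int) (index : Int) (answer : Option (List Int)) : List Int :=
  (PySem.List.pyRange index (arr.length : Int) 1).foldl
    (fun acc i => if PySem.List.pyGetD arr i 0 = target then acc ++ [i + 1] else acc)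
    (answer.getD [])

-- ===== PRECONDITION & SPEC =====
-- Pre_search excludes exactly the inputs on which A raises: index > len(arr) (the recursion
-- overruns and arr[index] raises IndexError) or index < -len(arr) (negative index out of range).
def Pre_search (arr : List Int) (target : Int) (index : Int) (answer : Option (List Int)) : Prop :=
  -(arr.length : Int) ≤ index ∧ index ≤ (arr.length : Int)
instance (arr : List Int) (target : Int) (index : Int) (answer : Option (List Int)) : Decidable (Pre_search arr target index answer) := by unfold Pre_search; infer_instance
def pvWitness_search : List Int × Int × Int × Option (List Int) := ([1, 2, 1], 1, 0, none)

def Spec_search (arr : List Int) (target : Int) (index : Int) (answer : Option (List Int)) (out : List Int) : Prop := out = search_alt arr target index answer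
instance (arr : List Int) (target : Int) (index : Int) (answer : Option (List Int)) (out : List Int) : Decidable (Spec_search arr target index answer out) := by unfold Spec_search; infer_instance

-- ===== CLAIM (what is proved, stated in full; the proofs are below) =====
def Claim_equal_search : Prop := ∀ (arr : List Int) (target : Int) (index : Int) (answer : Option (List Int)), Dom_search arr target index answer → Pre_search arr target index answer → Spec_search arr target index answer (search arr target index answer)


-- ===== LEMMAS AND PROOFS =====

theorem pyGetD_of_pyGet?_eq_some {xs : List Int} {i : Int} {v : Int} (d : Int)
    (h : PySem.List.pyGet? xs i = some v) : PySem.List.pyGetD xs i d = v := by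
  simp [PySem.List.pyGetD, h]

theorem search_eq_alt (arr : List Int) (target : Int) :
    ∀ (index : Int) (answer : Option (List Int)),
      -(arr.length : Int) ≤ index → index ≤ (arr.length : Int) →
      search arr target index answer = search_alt arr target index answer := by
  intro index
  induction hN : ((arr.length : Int) - index).toNat using Nat.strong_induction_on generalizing index with
  | _ N ih =>
    intro answer h1 h2
    rcases eq_or_lt_of_le h2 with heq | hlt
    · unfold search search_alt
      rw [PySem.List.pyRange_one_eq_nil (le_of_eq heq.symm)]
      simp [heq]
    · have hin : PySem.Raise.InRange arr.length index := by
        unfold PySem.Raise.InRange; omega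
      obtain ⟨v, hv⟩ : ∃ v, PySem.List.pyGet? arr index = some v := by
        cases hc : PySem.List.pyGet? arr index with
        | none => exact absurd ((PySem.List.pyGet?_eq_none_iff arr index).mp hc) (not_not_intro hin)
        | some v => exact ⟨v, rfl⟩
      have hne : index ≠ (arr.length : Int) := ne_of_lt hlt
      rw [search]
      simp only [hne, if_false]
      split
      · next heq => rw [hv] at heq; simp at heq
      · next v' heq =>
        rw [hv] at heq
        injection heq with heq'
        subst heq'
        unfold search_alt
        rw [PySem.List.pyRange_one_cons hlt]
        simp only [List.foldl_cons, pyGetD_of_pyGet?_eq_some 0 hv]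
        have hrec := ih (((arr.length : Int) - (index + 1)).toNat) (by omega) (index + 1) rfl
        by_cases hvt : v = target
        · simp only [if_pos hvt]
          rw [hrec (some (answer.getD [] ++ [index + 1])) (by omega) (by omega)]
          unfold search_alt
          simp
        · simp only [if_neg hvt]
          rw [hrec (some (answer.getD [])) (by omega) (by omega)]
          unfold search_alt
          simp

-- ===== VERDICT (by name: the statement is the Claim_ definition above) =====
theorem search_spec : Claim_equal_search := by
  intro arr target index answer _ hpre
  unfold Spec_search
  exact search_eq_alt arr target index answer hpre.1 hpre.2
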